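-- pv_equiv track=rewrite | github.com/stefan-bordei/pyAOC | src/day5.py | get_crate_stacks
-- ===== SOURCE A (Python) =====
-- def get_crate_stacks(crate_data):
--     flattened = [
--         item for sublist in [
--             [
--                 (item[i], i//4+1) for i, c in enumerate(item) if c.isalpha()
--             ] for item in crate_data
--         ] for item in sublist
--     ]
--
--     res = {}
--     # Not optimal but my brain hurts....
--     for i in list(range(9)):
--         res[i+1] = []
--         for item in flattened:
--             if item[1] == i+1:
--                 res[i+1].append(item[0])
--     return res
-- ===== SOURCE B (Python) =====
-- def get_crate_stacks(crate_data):
--     return {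
--         k: [c for row in crate_data for c in row[4 * k - 4 : 4 * k] if c.isalpha()]
--         for k in range(1, 10)
--     }
-- ===== Notes on version B (the rewrite author's own statement) =====
-- stated objective: simpler
-- what changed: B is a single dict comprehension that builds each stack directly by slicing every row to that column's 4-character window and keeping the letters, instead of A's intermediate flattened (letter, column) pair list of all letters re-scanned once per key.
import Mathlib
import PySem

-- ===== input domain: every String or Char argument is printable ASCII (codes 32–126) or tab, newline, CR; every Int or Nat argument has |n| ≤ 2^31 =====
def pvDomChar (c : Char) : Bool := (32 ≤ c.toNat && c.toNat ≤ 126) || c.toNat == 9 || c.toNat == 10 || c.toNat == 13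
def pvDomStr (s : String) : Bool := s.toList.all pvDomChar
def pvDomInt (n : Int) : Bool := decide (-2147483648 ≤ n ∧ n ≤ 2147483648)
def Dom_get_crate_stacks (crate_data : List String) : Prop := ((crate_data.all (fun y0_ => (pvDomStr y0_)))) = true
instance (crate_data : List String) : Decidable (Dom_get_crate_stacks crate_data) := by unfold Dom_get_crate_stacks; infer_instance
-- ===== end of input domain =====

-- B builds each stack directly with one dict comprehension, slicing every row to that
-- column's 4-character window, instead of A's flattened pair list re-scanned once per key.

-- ===== PORT A =====
def get_crate_stacks (crate_data : List String) : List (Int × List String) :=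
  let flattened : List (String × Int) :=
    (crate_data.map (fun item =>
      ((PySem.List.enumerate item.toList 0).filter (fun p => PySem.Chars.isalpha p.2)).map
        (fun p => (String.ofList [p.2], PySem.Int.floordiv p.1 4 + 1)))).flatten
  let res : PySem.Dict Int (List String) :=
    (PySem.List.pyRange 0 9 1).foldl (fun res i =>
      flattened.foldl (fun res item =>
        if item.2 == i + 1 then res.modify (i + 1) [] (fun l => l ++ [item.1]) else res)
        (res.insert (i + 1) []))
      PySem.Dict.empty
  res.items

-- ===== PORT B =====
def get_crate_stacks_alt (crate_data : List String) : List (Int × List String) :=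
  (PySem.List.pyRange 1 10 1).map (fun k =>
    (k, crate_data.flatMap (fun row =>
      (PySem.List.slice row.toList (some (4 * k - 4)) (some (4 * k))).filterMap
        (fun c => if PySem.Chars.isalpha c then some (String.ofList [c]) else none))))

-- ===== PRECONDITION & SPEC =====
def Spec_get_crate_stacks (crate_data : List String) (out : List (Int × List String)) : Prop := out = get_crate_stacks_alt crate_data
instance (crate_data : List String) (out : List (Int × List String)) : Decidable (Spec_get_crate_stacks crate_data out) := by unfold Spec_get_crate_stacks; infer_instance

-- ===== CLAIM (what is proved, stated in full; the proofs are below) =====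
def Claim_equal_get_crate_stacks : Prop := ∀ (crate_data : List String), Dom_get_crate_stacks crate_data → Spec_get_crate_stacks crate_data (get_crate_stacks crate_data)

-- ===== LEMMAS AND PROOFS =====

-- letters of l whose column is k, in order (the characterisation of A's per-key scan)
def pvF (l : List (String × Int)) (k : Int) : List String :=
  (l.filter (fun it => it.2 == k)).map (fun it => it.1)

theorem pv_modify_modify {κ ν : Type} [BEq κ] [LawfulBEq κ] (d : PySem.Dict κ ν)
    (k : κ) (d0 : ν) (g h : ν → ν) :
    (d.modify k d0 g).modify k d0 h = d.modify k d0 (fun v => h (g v)) := by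
  simp [PySem.Dict.modify, PySem.Dict.getD_insert_self, PySem.Dict.insert_insert_self]

-- A's inner loop over flattened, started on a dict whose entry at k is already f-shaped
theorem pv_A_inner (l : List (String × Int)) (k : Int)
    (d : PySem.Dict Int (List String)) (g : List String → List String) :
    l.foldl (fun r it => if it.2 == k then r.modify k [] (fun v => v ++ [it.1]) else r)
        (d.modify k [] g)
      = d.modify k [] (fun v => g v ++ pvF l k) := by
  induction l generalizing g with
  | nil => simp [pvF]
  | cons it rest ih =>
    by_cases h : it.2 = k
    · simp only [List.foldl_cons, h, BEq.rfl, if_true, pv_modify_modify]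
      rw [ih (fun v => g v ++ [it.1])]
      simp [pvF, h, List.append_assoc]
    · have hb : (it.2 == k) = false := by simp [h]
      simp only [List.foldl_cons, hb, Bool.false_eq_true, if_false]
      rw [ih g]
      simp [pvF, hb]

-- A's whole dict loop reduced to nine fresh inserts of the characterised lists
theorem pv_A_items (fl : List (String × Int)) :
    ((PySem.List.pyRange 0 9 1).foldl (fun res i =>
        fl.foldl (fun res item =>
          if item.2 == i + 1 then res.modify (i + 1) [] (fun l => l ++ [item.1]) else res)
          (res.insert (i + 1) []))
      (PySem.Dict.empty : PySem.Dict Int (List String))).items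
      = (PySem.List.pyRange 0 9 1).map (fun i => (i + 1, pvF fl (i + 1))) := by
  have hstep : ∀ (res : PySem.Dict Int (List String)) (i : Int),
      fl.foldl (fun res item =>
          if item.2 == i + 1 then res.modify (i + 1) [] (fun l => l ++ [item.1]) else res)
        (res.insert (i + 1) [])
      = res.insert (i + 1) (pvF fl (i + 1)) := by
    intro res i
    have h0 : res.insert (i + 1) ([] : List String) = res.modify (i + 1) [] (fun _ => []) := rfl
    rw [h0, pv_A_inner fl (i + 1) res (fun _ => [])]
    simp [PySem.Dict.modify]
  calc ((PySem.List.pyRange 0 9 1).foldl (fun res i =>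
        fl.foldl (fun res item =>
          if item.2 == i + 1 then res.modify (i + 1) [] (fun l => l ++ [item.1]) else res)
          (res.insert (i + 1) []))
      (PySem.Dict.empty : PySem.Dict Int (List String))).items
      = ((PySem.List.pyRange 0 9 1).foldl (fun res i => res.insert (i + 1) (pvF fl (i + 1)))
          (PySem.Dict.empty : PySem.Dict Int (List String))).items := by
        congr 1
        exact PySem.List.foldl_congr_mem _ _ _ _ (fun res i _ => hstep res i)
    _ = (PySem.List.pyRange 0 9 1).map (fun i => (i + 1, pvF fl (i + 1))) := by
        rw [PySem.Dict.items_foldl_insert_fresh _ _ _ _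
          (fun a _ => PySem.Dict.contains_empty _) (by decide)]
        simp [show (PySem.Dict.empty : PySem.Dict Int (List String)).items = [] from rfl]

-- every index produced by enumerate is at least the start offset
theorem pv_enum_fst_le {α : Type} (l : List α) (n : Int) (p : Int × α)
    (hp : p ∈ PySem.List.enumerate l n) : n ≤ p.1 := by
  have h1 : p.1 ∈ (PySem.List.enumerate l n).map (·.1) := List.mem_map_of_mem hp
  rw [PySem.List.map_fst_enumerate] at h1
  exact (PySem.List.mem_pyRange_one.mp h1).1

-- filtering enumerate by an index UPPER bound is a take
theorem pv_enum_take {α : Type} (l : List α) (a b : Int) :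
    (PySem.List.enumerate l a).filter (fun p => decide (p.1 < b))
      = PySem.List.enumerate (l.take (b - a).toNat) a := by
  induction l generalizing a with
  | nil => simp
  | cons x t ih =>
    by_cases h : a < b
    · have hn : (b - a).toNat = (b - (a + 1)).toNat + 1 := by omega
      rw [hn, List.take_succ_cons]
      simp only [PySem.List.enumerate_cons, List.filter_cons]
      simp [h, ih]
    · have hn0 : (b - a).toNat = 0 := by omega
      have hn1 : (b - (a + 1)).toNat = 0 := by omega
      simp only [PySem.List.enumerate_cons, List.filter_cons, hn0, List.take_zero]
      simp only [h, decide_false, ih, hn1, List.take_zero]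
      simp

-- filtering enumerate by an index window skips the prefix below the lower bound
theorem pv_enum_drop {α : Type} (l : List α) (n a b : Int) (h : n ≤ a) :
    (PySem.List.enumerate l n).filter (fun p => decide (a ≤ p.1) && decide (p.1 < b))
      = (PySem.List.enumerate (l.drop (a - n).toNat) a).filter
          (fun p => decide (a ≤ p.1) && decide (p.1 < b)) := by
  induction l generalizing n with
  | nil => simp
  | cons x t ih =>
    by_cases hn : n = a
    · subst hn; simp
    · have hlt : n < a := lt_of_le_of_ne h hn
      have hd : (a - n).toNat = (a - (n + 1)).toNat + 1 := by omega
      rw [hd, List.drop_succ_cons]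
      simp only [PySem.List.enumerate_cons, List.filter_cons]
      have : (decide (a ≤ n) && decide (n < b)) = false := by
        simp [show ¬ a ≤ n by omega]
      rw [this]
      simp only [Bool.false_eq_true, if_false]
      exact ih (n + 1) (by omega)

-- the window filter over enumerate IS enumerate of the drop/take slice
theorem pv_enum_window {α : Type} (l : List α) (a b : Int) (ha : 0 ≤ a) :
    (PySem.List.enumerate l 0).filter (fun p => decide (a ≤ p.1) && decide (p.1 < b))
      = PySem.List.enumerate ((l.drop a.toNat).take (b - a).toNat) a := by
  rw [pv_enum_drop l 0 a b ha]
  have h1 : (a - 0).toNat = a.toNat := by omega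
  rw [h1]
  have h2 : ∀ p ∈ PySem.List.enumerate (l.drop a.toNat) a,
      (decide (a ≤ p.1) && decide (p.1 < b)) = decide (p.1 < b) := by
    intro p hp
    simp [pv_enum_fst_le _ _ _ hp]
  rw [List.filter_congr h2, pv_enum_take]

-- keeping the letters of an enumerated list forgets the indices
theorem pv_enum_alpha (m : List Char) (a : Int) :
    ((PySem.List.enumerate m a).filter (fun p => PySem.Chars.isalpha p.2)).map
        (fun p => String.ofList [p.2])
      = m.filterMap (fun c => if PySem.Chars.isalpha c then some (String.ofList [c]) else none) := by
  induction m generalizing a with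
  | nil => simp
  | cons c t ih =>
    simp only [PySem.List.enumerate_cons, List.filter_cons, List.filterMap_cons]
    by_cases h : PySem.Chars.isalpha c
    · simp [h, ih]
    · simp [h, ih]

-- per-row: A's (letter, column) pairs at column k are B's slice of the row
theorem pv_row (row : List Char) (k : Int) (hk : 1 ≤ k) :
    pvF (((PySem.List.enumerate row 0).filter (fun p => PySem.Chars.isalpha p.2)).map
          (fun p => (String.ofList [p.2], PySem.Int.floordiv p.1 4 + 1))) k
      = ((row.drop (4 * k - 4).toNat).take 4).filterMap
          (fun c => if PySem.Chars.isalpha c then some (String.ofList [c]) else none) := by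
  unfold pvF
  rw [List.filter_map, List.map_map]
  have key : ((PySem.List.enumerate row 0).filter (fun p => PySem.Chars.isalpha p.2)).filter
        ((fun it => it.2 == k) ∘ (fun p => (String.ofList [p.2], PySem.Int.floordiv p.1 4 + 1)))
      = (((PySem.List.enumerate row 0).filter
            (fun p => decide (4 * k - 4 ≤ p.1) && decide (p.1 < 4 * k))).filter
          (fun p => PySem.Chars.isalpha p.2)) := by
    rw [List.filter_filter, List.filter_filter]
    apply List.filter_congr
    intro p hp
    have h0 : 0 ≤ p.1 := pv_enum_fst_le row 0 p hp
    by_cases hq : p.1 / 4 + 1 = k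
    · have h1 : 4 * k - 4 ≤ p.1 := by omega
      have h2 : p.1 < 4 * k := by omega
      simp [Function.comp, hq, h1, h2]
    · have hw : ¬ (4 * k - 4 ≤ p.1 ∧ p.1 < 4 * k) := fun hw => hq (by omega)
      rcases Decidable.not_and_iff_not_or_not.mp hw with h | h
      · simp [Function.comp, hq, h]
      · simp [Function.comp, hq, h]
  rw [key]
  rw [pv_enum_window row (4 * k - 4) (4 * k) (by omega)]
  have ht : (4 * k - (4 * k - 4)).toNat = 4 := by omega
  rw [ht]
  have hm : ((fun it => it.1) ∘ (fun p => (String.ofList [p.2], PySem.Int.floordiv p.1 4 + 1)))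
      = fun p : Int × Char => String.ofList [p.2] := rfl
  rw [hm, pv_enum_alpha]

-- per column: A's pvF of the whole flattened list is B's flatMap of slices
theorem pv_col (crate_data : List String) (k : Int) (hk : 1 ≤ k) :
    pvF ((crate_data.map (fun item =>
        ((PySem.List.enumerate item.toList 0).filter (fun p => PySem.Chars.isalpha p.2)).map
          (fun p => (String.ofList [p.2], PySem.Int.floordiv p.1 4 + 1)))).flatten) k
      = crate_data.flatMap (fun row =>
          (PySem.List.slice row.toList (some (4 * k - 4)) (some (4 * k))).filterMap
            (fun c => if PySem.Chars.isalpha c then some (String.ofList [c]) else none)) := by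
  induction crate_data with
  | nil => simp [pvF]
  | cons s t ih =>
    simp only [List.map_cons, List.flatten_cons, List.flatMap_cons]
    have happ : ∀ (l1 l2 : List (String × Int)), pvF (l1 ++ l2) k = pvF l1 k ++ pvF l2 k := by
      intro l1 l2; simp [pvF]
    rw [happ, ih, pv_row s.toList k hk]
    have hs : PySem.List.slice s.toList (some (4 * k - 4)) (some (4 * k))
        = (s.toList.drop (4 * k - 4).toNat).take 4 := by
      rw [PySem.List.slice_toNat _ (by omega) (by omega)]
      congr 1
      omega
    rw [hs]

-- ===== VERDICT (by name: the statement is the Claim_ definition above) =====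
theorem get_crate_stacks_spec : Claim_equal_get_crate_stacks := by
  intro crate_data _
  unfold Spec_get_crate_stacks get_crate_stacks get_crate_stacks_alt
  rw [pv_A_items]
  rw [show PySem.List.pyRange 0 9 1 = (PySem.List.pyRange 1 10 1).map (fun k => k - 1) from by decide]
  rw [List.map_map]
  apply List.map_congr_left
  intro k hk
  have hk1 : 1 ≤ k := (PySem.List.mem_pyRange_one.mp hk).1
  simp only [Function.comp]
  rw [show k - 1 + 1 = k by ring]
  rw [pv_col crate_data k hk1]
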